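-- pv_equiv track=rewrite | github.com/Handonggon/coding_test | 프로그래머스/챌린지/LG CNS Code Monster(2022)/예선/3번/hdg.py | solution
-- ===== SOURCE A (Python) =====
-- def solution(reference, track):
--     combination = {}
--     for start in range(len(reference)):
--         for end in range(start+1, len(reference)+1):
--             combination[reference[start:end]] = (end - start)
--
--     answer = [len(track)]
--     for i in range(len(track)):
--         lenght = 1
--         for j in range(i+1):
--             if track[j:i+1] in combination:
--                 lenght = max(lenght, min(answer[j], combination[track[j:i+1]]))
--         answer.append(lenght)
--     return answer[-1]
-- ===== SOURCE B (Python) =====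
-- def solution(reference, track):
--     m = len(track)
--     ans = [m]
--     jmin = 0
--     for i in range(m):
--         while jmin <= i and track[jmin:i + 1] not in reference:
--             jmin += 1
--         best = 1
--         for j in range(jmin, i + 1):
--             best = max(best, min(ans[j], i + 1 - j))
--         ans.append(best)
--     return ans[-1]
-- ===== Notes on version B (the rewrite author's own statement) =====
-- stated objective: faster
-- what changed: B removes A's O(n^3) precomputed dictionary of all reference substrings: a two-pointer left boundary (monotone in i, maintained with O(m) str 'in' tests in total) replaces the per-window dictionary lookups, and the inner DP loop becomes an unconditional max/min scan from that boundary.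
import Mathlib
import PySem

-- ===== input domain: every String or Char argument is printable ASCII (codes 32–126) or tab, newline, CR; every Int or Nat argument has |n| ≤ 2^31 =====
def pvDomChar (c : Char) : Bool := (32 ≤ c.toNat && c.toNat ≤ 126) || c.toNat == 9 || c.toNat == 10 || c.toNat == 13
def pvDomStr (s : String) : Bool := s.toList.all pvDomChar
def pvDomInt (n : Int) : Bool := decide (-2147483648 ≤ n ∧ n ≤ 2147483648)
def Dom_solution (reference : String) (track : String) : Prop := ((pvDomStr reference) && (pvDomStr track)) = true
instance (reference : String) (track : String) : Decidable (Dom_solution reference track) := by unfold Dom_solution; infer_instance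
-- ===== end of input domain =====

-- B drops A's substring dictionary: a monotone two-pointer left boundary (O(m) str 'in'
-- tests in total) replaces the per-window dictionary lookups; measured faster.

-- ===== PORT A =====
-- combination = {reference[start:end]: end－start  for start … for end …}
def combA (r : List Char) : PySem.Dict (List Char) Int :=
  (PySem.List.pyRange 0 (PySem.List.len r) 1).foldl
    (fun d start =>
      (PySem.List.pyRange (start + 1) (PySem.List.len r + 1) 1).foldl
        (fun d e => d.insert (PySem.List.slice r (some start) (some e)) (e - start)) d)
    PySem.Dict.empty

-- the inner "for j in range(i+1)" loop accumulating "lenght"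
def innerA (comb : PySem.Dict (List Char) Int) (t : List Char) (answer : List Int) (i : Int) : Int :=
  (PySem.List.pyRange 0 (i + 1) 1).foldl
    (fun length j =>
      if comb.contains (PySem.List.slice t (some j) (some (i + 1))) then
        max length (min (PySem.List.pyGetD answer j 0)
          (comb.getD (PySem.List.slice t (some j) (some (i + 1))) 0))
      else length) 1

def solution (reference : String) (track : String) : Int :=
  let r := reference.toList
  let t := track.toList
  let comb := combA r
  let answer :=
    (PySem.List.pyRange 0 (PySem.List.len t) 1).foldl
      (fun answer i => answer ++ [innerA comb t answer i]) [PySem.List.len t]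
  PySem.List.pyGetD answer (-1) 0

-- ===== PORT B =====
-- the "while jmin <= i and track[jmin:i+1] not in reference: jmin += 1" loop of Source B
def advance (r t : List Char) (i : Nat) (jmin : Nat) : Nat :=
  if h : jmin ≤ i ∧ PySem.Chars.isIn (PySem.List.slice t (some (jmin : Int)) (some ((i : Int) + 1))) r = false then
    advance r t i (jmin + 1)
  else jmin
termination_by i + 1 - jmin
decreasing_by omega

-- the "for j in range(jmin, i+1)" loop of Source B accumulating "best"
def innerB (ans : List Int) (i jmin : Nat) : Int :=
  (PySem.List.pyRange (jmin : Int) ((i : Int) + 1) 1).foldl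
    (fun best j => max best (min (PySem.List.pyGetD ans j 0) ((i : Int) + 1 - j))) 1

def solution_alt (reference : String) (track : String) : Int :=
  let r := reference.toList
  let t := track.toList
  let st :=
    (List.range t.length).foldl
      (fun st i =>
        let jmin := advance r t i st.2
        (st.1 ++ [innerB st.1 i jmin], jmin))
      ([(t.length : Int)], 0)
  PySem.List.pyGetD st.1 (-1) 0

-- ===== PRECONDITION & SPEC =====
def Spec_solution (reference : String) (track : String) (out : Int) : Prop := out = solution_alt reference track
instance (reference : String) (track : String) (out : Int) : Decidable (Spec_solution reference track out) := by unfold Spec_solution; infer_instance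

-- ===== CLAIM (what is proved, stated in full; the proofs are below) =====
def Claim_equal_solution : Prop := ∀ (reference : String) (track : String), Dom_solution reference track → Spec_solution reference track (solution reference track)

-- ===== LEMMAS AND PROOFS =====

-- generic foldl invariant
theorem foldl_inv {α β : Type} (P : β → Prop) (g : β → α → β) :
    ∀ (l : List α) (d : β), (∀ d x, x ∈ l → P d → P (g d x)) → P d → P (l.foldl g d)
  | [], _, _, hd => hd
  | x :: xs, d, h, hd =>
      foldl_inv P g xs (g d x) (fun d y hy => h d y (List.mem_cons_of_mem x hy))
        (h d x List.mem_cons_self hd)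

-- any slice reference[start:end] with 0 ≤ start < end ≤ len is a nonempty infix of length end－start
theorem slice_key_facts (r : List Char) (start e : Int) (h0 : 0 ≤ start) (h1 : start < e)
    (h2 : e ≤ (r.length : Int)) :
    ((PySem.List.slice r (some start) (some e)).length : Int) = e - start ∧
      PySem.List.slice r (some start) (some e) ≠ [] ∧
      PySem.List.slice r (some start) (some e) <:+: r := by
  have hs : start = ((start.toNat : Nat) : Int) := (Int.toNat_of_nonneg h0).symm
  have he : e = ((e.toNat : Nat) : Int) := (Int.toNat_of_nonneg (by omega)).symm
  rw [hs, he, PySem.List.slice_natCast]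
  refine ⟨?_, ?_, ?_⟩
  · simp [List.length_take, List.length_drop]
    omega
  · have : (List.take (e.toNat - start.toNat) (List.drop start.toNat r)).length
        = min (e.toNat - start.toNat) (r.length - start.toNat) := by
      simp [List.length_take, List.length_drop]
    intro hnil
    rw [hnil] at this
    simp at this
    omega
  · exact ((List.take_prefix _ _).isInfix).trans ((List.drop_suffix _ _).isInfix)

-- every key of combA r is a nonempty infix of r and carries its own length as value
theorem combA_sound (r : List Char) (k : List Char) :
    (combA r).get? k = none ∨
      ((combA r).get? k = some (k.length : Int) ∧ k ≠ [] ∧ k <:+: r) := by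
  have main : ∀ k, (combA r).get? k = none ∨
      ((combA r).get? k = some (k.length : Int) ∧ k ≠ [] ∧ k <:+: r) := by
    unfold combA
    apply foldl_inv (fun (d : PySem.Dict (List Char) Int) => ∀ k, d.get? k = none ∨
      (d.get? k = some (k.length : Int) ∧ k ≠ [] ∧ k <:+: r))
    · intro d start hstart hd
      apply foldl_inv (fun (d : PySem.Dict (List Char) Int) => ∀ k, d.get? k = none ∨
        (d.get? k = some (k.length : Int) ∧ k ≠ [] ∧ k <:+: r))
      · intro d e he hdd k
        rw [PySem.List.len_eq] at hstart he
        rw [PySem.List.mem_pyRange_one] at hstart he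
        rw [PySem.Dict.get?_insert]
        split
        · next heq =>
            subst heq
            obtain ⟨hl, hne, hinf⟩ := slice_key_facts r start e (by omega) (by omega) (by omega)
            right
            exact ⟨by rw [hl], hne, hinf⟩
        · exact hdd k
      · exact hd
    · intro k
      left
      exact PySem.Dict.get?_empty k
  exact main k

theorem isSome_insert {d : PySem.Dict (List Char) Int} {k key : List Char} {v : Int}
    (h : (d.get? k).isSome) : ((d.insert key v).get? k).isSome := by
  rw [PySem.Dict.get?_insert]
  split
  · rfl
  · exact h

-- every nonempty infix of r is a key of combA r
theorem combA_complete (r : List Char) (k : List Char) (hne : k ≠ []) (hinf : k <:+: r) :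
    ((combA r).get? k).isSome := by
  obtain ⟨pre, suf, hr⟩ := hinf
  have hklen : 0 < k.length := List.length_pos_iff.mpr hne
  have hn : r.length = pre.length + k.length + suf.length := by
    rw [← hr]; simp [List.length_append]; omega
  have hsmem : ((pre.length : Int)) ∈ PySem.List.pyRange 0 (PySem.List.len r) := by
    rw [PySem.List.len_eq, PySem.List.mem_pyRange_one]
    constructor
    · positivity
    · exact_mod_cast by omega
  obtain ⟨l1, l2, hsplit⟩ := List.append_of_mem hsmem
  unfold combA
  rw [hsplit, List.foldl_append, List.foldl_cons]
  apply foldl_inv (fun (d : PySem.Dict (List Char) Int) => ((d.get? k).isSome = true))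
  · intro d x _ hd
    exact foldl_inv (fun (d : PySem.Dict (List Char) Int) => ((d.get? k).isSome = true)) _ _ _
      (fun d y _ hdd => isSome_insert hdd) hd
  · have hemem : ((pre.length + k.length : Nat) : Int) ∈
        PySem.List.pyRange ((pre.length : Int) + 1) (PySem.List.len r + 1) := by
      rw [PySem.List.len_eq, PySem.List.mem_pyRange_one]
      constructor
      · exact_mod_cast by omega
      · exact_mod_cast by omega
    obtain ⟨l3, l4, hsplit2⟩ := List.append_of_mem hemem
    rw [hsplit2, List.foldl_append, List.foldl_cons]
    apply foldl_inv (fun (d : PySem.Dict (List Char) Int) => ((d.get? k).isSome = true))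
    · intro d y _ hdd
      exact isSome_insert hdd
    · have hkey : PySem.List.slice r (some (pre.length : Int))
          (some ((pre.length + k.length : Nat) : Int)) = k := by
        have : ((pre.length + k.length : Nat) : Int)
            = ((pre.length : Nat) : Int) + ((k.length : Nat) : Int) := by push_cast; ring
        rw [this, PySem.List.slice_natCast_add]
        rw [← hr, List.append_assoc, List.drop_left, List.take_left]
      rw [hkey, PySem.Dict.get?_insert]
      simp

-- window facts (j ≤ i < len track): length of track[j:i+1]
theorem slice_window_len (t : List Char) (i j : Nat) (_hj : j ≤ i) (hi : i < t.length) :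
    (PySem.List.slice t (some (j : Int)) (some ((i : Int) + 1))).length = i + 1 - j := by
  have h1 : ((i : Int) + 1) = ((i + 1 : Nat) : Int) := by push_cast; ring
  rw [h1, PySem.List.slice_natCast]
  simp [List.length_take, List.length_drop]
  omega

-- dict lookup at the use site agrees with the direct substring test
theorem combA_contains_eq (r t : List Char) (i j : Nat) (hj : j ≤ i) (hi : i < t.length) :
    (combA r).contains (PySem.List.slice t (some (j : Int)) (some ((i : Int) + 1))) =
      PySem.Chars.isIn (PySem.List.slice t (some (j : Int)) (some ((i : Int) + 1))) r := by
  set sub := PySem.List.slice t (some (j : Int)) (some ((i : Int) + 1)) with hsub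
  have hlen : sub.length = i + 1 - j := slice_window_len t i j hj hi
  have hne : sub ≠ [] := by
    intro h; rw [h] at hlen; simp at hlen; omega
  rw [PySem.Dict.contains_eq_isSome_get?]
  cases hin : PySem.Chars.isIn sub r with
  | true =>
      have hinf := (PySem.Chars.isIn_iff_infix sub r).mp hin
      rw [combA_complete r sub hne hinf]
  | false =>
      have hninf : ¬ sub <:+: r := fun h => by
        rw [(PySem.Chars.isIn_iff_infix sub r).mpr h] at hin; exact Bool.noConfusion hin
      rcases combA_sound r sub with h | ⟨_, _, hinf⟩
      · rw [h]; rfl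
      · exact absurd hinf hninf

-- on a present key the dict value is the window length i+1-j
theorem combA_getD_eq (r t : List Char) (i j : Nat) (hj : j ≤ i) (hi : i < t.length)
    (h : PySem.Chars.isIn (PySem.List.slice t (some (j : Int)) (some ((i : Int) + 1))) r = true) :
    (combA r).getD (PySem.List.slice t (some (j : Int)) (some ((i : Int) + 1))) 0 =
      (i : Int) + 1 - (j : Int) := by
  set sub := PySem.List.slice t (some (j : Int)) (some ((i : Int) + 1)) with hsub
  have hlen : sub.length = i + 1 - j := slice_window_len t i j hj hi
  have hne : sub ≠ [] := by
    intro hh; rw [hh] at hlen; simp at hlen; omega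
  have hinf := (PySem.Chars.isIn_iff_infix sub r).mp h
  have hsome := combA_complete r sub hne hinf
  rcases combA_sound r sub with hnone | ⟨hval, _, _⟩
  · rw [hnone] at hsome; exact Bool.noConfusion hsome
  · rw [PySem.Dict.getD_eq_get?_getD, hval, hlen]
    simp
    push_cast [Nat.cast_sub (by omega : j ≤ i + 1)]
    ring

-- the common inner-loop step: one candidate window track[j:i+1]
def stepS (r t : List Char) (ans : List Int) (i : Nat) (b : Int) (j : Nat) : Int :=
  if PySem.Chars.isIn (PySem.List.slice t (some (j : Int)) (some ((i : Int) + 1))) r then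
    max b (min (ans.getD j 0) ((i : Int) + 1 - (j : Int)))
  else b

-- a wider window contains the narrower one as a suffix
theorem slice_window_mono (t : List Char) (i j' j0 : Nat) (h : j' ≤ j0) :
    PySem.List.slice t (some (j0 : Int)) (some ((i : Int) + 1)) <:+:
      PySem.List.slice t (some (j' : Int)) (some ((i : Int) + 1)) := by
  have h1 : ((i : Int) + 1) = ((i + 1 : Nat) : Int) := by push_cast; ring
  rw [h1, PySem.List.slice_natCast, PySem.List.slice_natCast]
  have key : List.take (i + 1 - j0) (List.drop j0 t)
      = List.drop (j0 - j') (List.take (i + 1 - j') (List.drop j' t)) := by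
    rw [List.drop_take, List.drop_drop]
    have e1 : i + 1 - j' - (j0 - j') = i + 1 - j0 := by omega
    have e2 : j' + (j0 - j') = j0 := by omega
    rw [e1, e2]
  rw [key]
  exact (List.drop_suffix _ _).isInfix

-- A's inner loop is the ascending max-fold of stepS
theorem innerA_eq_fold (r t : List Char) (ans : List Int) (i : Nat) (hi : i < t.length) :
    innerA (combA r) t ans (i : Int) = (List.range (i + 1)).foldl (stepS r t ans i) 1 := by
  unfold innerA
  have h1 : ((i : Int) + 1) = ((i + 1 : Nat) : Int) := by push_cast; ring
  rw [h1, PySem.List.pyRange_zero_natCast, List.foldl_map]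
  apply PySem.List.foldl_congr_mem
  intro acc j hjmem
  have hj : j ≤ i := by
    have := List.mem_range.mp hjmem; omega
  rw [← h1, combA_contains_eq r t i j hj hi, PySem.List.pyGetD_natCast]
  unfold stepS
  split
  · next hin => rw [combA_getD_eq r t i j hj hi hin]
  · rfl

-- if no window in l is a substring, the fold is the identity
theorem fold_stepS_id (r t : List Char) (ans : List Int) (i : Nat) (l : List Nat) (b : Int)
    (h : ∀ j ∈ l, PySem.Chars.isIn (PySem.List.slice t (some (j : Int)) (some ((i : Int) + 1))) r = false) :
    l.foldl (stepS r t ans i) b = b := by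
  induction l generalizing b with
  | nil => rfl
  | cons x xs ih =>
      rw [List.foldl_cons]
      have hx : stepS r t ans i b x = b := by
        unfold stepS; rw [h x List.mem_cons_self]; rfl
      rw [hx]
      exact ih b (fun j hj => h j (List.mem_cons_of_mem x hj))

-- extending the window right keeps the narrower one as a prefix
theorem slice_end_mono (t : List Char) (j k : Nat) :
    PySem.List.slice t (some (j : Int)) (some (k : Int)) <+:
      PySem.List.slice t (some (j : Int)) (some ((k : Int) + 1)) := by
  have h1 : ((k : Int) + 1) = ((k + 1 : Nat) : Int) := by push_cast; ring
  rw [h1, PySem.List.slice_natCast, PySem.List.slice_natCast]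
  exact List.take_prefix_take_left (by omega)

-- range(a, b) over Nat bounds as a mapped List.range
theorem pyRange_natCast_natCast (a b : Nat) :
    PySem.List.pyRange (a : Int) (b : Int) 1 = (List.range (b - a)).map (fun k => ((a + k : Nat) : Int)) := by
  rw [PySem.List.pyRange_of_pos _ _ (by norm_num)]
  have : (if (a : Int) < (b : Int) then (((b : Int) - a + 1 - 1) / 1).toNat else 0) = b - a := by
    split
    · next h => omega
    · next h => omega
  rw [this]
  apply List.map_congr_left
  intro k _
  push_cast
  ring

-- what B's while loop computes: the first j ≥ j0 whose window is a substring (or i+1)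
theorem advance_spec (r t : List Char) (i : Nat) (j0 : Nat) (hj : j0 ≤ i + 1) :
    advance r t i j0 ≤ i + 1 ∧ j0 ≤ advance r t i j0 ∧
      (∀ j, j0 ≤ j → j < advance r t i j0 →
        PySem.Chars.isIn (PySem.List.slice t (some (j : Int)) (some ((i : Int) + 1))) r = false) ∧
      (advance r t i j0 ≤ i →
        PySem.Chars.isIn (PySem.List.slice t (some ((advance r t i j0 : Nat) : Int)) (some ((i : Int) + 1))) r = true) := by
  have main : ∀ (k j0 : Nat), i + 1 - j0 ≤ k → j0 ≤ i + 1 →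
      advance r t i j0 ≤ i + 1 ∧ j0 ≤ advance r t i j0 ∧
        (∀ j, j0 ≤ j → j < advance r t i j0 →
          PySem.Chars.isIn (PySem.List.slice t (some (j : Int)) (some ((i : Int) + 1))) r = false) ∧
        (advance r t i j0 ≤ i →
          PySem.Chars.isIn (PySem.List.slice t (some ((advance r t i j0 : Nat) : Int)) (some ((i : Int) + 1))) r = true) := by
    intro k
    induction k with
    | zero =>
        intro j0 hk hj0
        have hj0' : j0 = i + 1 := by omega
        rw [advance]
        split
        · next h => omega
        · next h =>
            refine ⟨by omega, le_rfl, fun j h1 h2 => absurd h2 (by omega), ?_⟩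
            intro hle; omega
    | succ k ih =>
        intro j0 hk hj0
        rw [advance]
        split
        · next h =>
            obtain ⟨ha, hb, hc, hd⟩ := ih (j0 + 1) (by omega) (by omega)
            refine ⟨ha, by omega, ?_, hd⟩
            intro j h1 h2
            rcases Nat.eq_or_lt_of_le h1 with rfl | h1'
            · exact h.2
            · exact hc j h1' h2
        · next h =>
            refine ⟨by omega, le_rfl, fun j h1 h2 => absurd h2 (by omega), ?_⟩
            intro hle
            rcases Decidable.not_and_iff_or_not.mp h with h' | h'
            · omega
            · simpa using h'
  exact main (i + 1 - j0) j0 le_rfl hj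

-- given the boundary jm, B's unconditional scan equals the full stepS fold
theorem innerB_eq_fold (r t : List Char) (ans : List Int) (i jm : Nat) (hjm : jm ≤ i + 1)
    (hlow : ∀ j, j < jm →
      PySem.Chars.isIn (PySem.List.slice t (some (j : Int)) (some ((i : Int) + 1))) r = false)
    (hhit : jm ≤ i →
      PySem.Chars.isIn (PySem.List.slice t (some (jm : Int)) (some ((i : Int) + 1))) r = true) :
    innerB ans i jm = (List.range (i + 1)).foldl (stepS r t ans i) 1 := by
  unfold innerB
  have h1 : ((i : Int) + 1) = ((i + 1 : Nat) : Int) := by push_cast; ring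
  rw [h1, pyRange_natCast_natCast, List.foldl_map]
  have h2 : i + 1 = jm + (i + 1 - jm) := by omega
  conv_rhs => rw [h2, List.range_add, List.foldl_append]
  rw [fold_stepS_id r t ans i (List.range jm) 1
      (fun j hj => hlow j (List.mem_range.mp hj))]
  rw [List.foldl_map]
  apply PySem.List.foldl_congr_mem
  intro acc k hk
  have hk' : k < i + 1 - jm := List.mem_range.mp hk
  have hjmi : jm ≤ i := by omega
  have hcond : PySem.Chars.isIn (PySem.List.slice t (some ((jm + k : Nat) : Int)) (some ((i : Int) + 1))) r = true := by
    have hmono := slice_window_mono t i jm (jm + k) (by omega)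
    exact (PySem.Chars.isIn_iff_infix _ _).mpr
      (hmono.trans ((PySem.Chars.isIn_iff_infix _ _).mp (hhit hjmi)))
  unfold stepS
  rw [hcond, ← h1, PySem.List.pyGetD_natCast]
  norm_num

-- the common outer fold: DP values via the full stepS fold
def specC (r t : List Char) (k : Nat) : List Int :=
  (List.range k).foldl
    (fun ans i => ans ++ [(List.range (i + 1)).foldl (stepS r t ans i) 1]) [(t.length : Int)]

-- B's outer-loop body, named for the proofs
def gB (r t : List Char) (st : List Int × Nat) (i : Nat) : List Int × Nat :=
  let jmin := advance r t i st.2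
  (st.1 ++ [innerB st.1 i jmin], jmin)

-- B's outer fold state: the DP list is specC and jmin is a sound left boundary
theorem B_state (r t : List Char) (k : Nat) :
    ((List.range k).foldl (gB r t) ([(t.length : Int)], 0)).1 = specC r t k ∧
      ((List.range k).foldl (gB r t) ([(t.length : Int)], 0)).2 ≤ k ∧
      (∀ j, j < ((List.range k).foldl (gB r t) ([(t.length : Int)], 0)).2 →
        PySem.Chars.isIn (PySem.List.slice t (some (j : Int)) (some (k : Int))) r = false) := by
  induction k with
  | zero => exact ⟨rfl, by norm_num, fun j hj => absurd hj (by norm_num)⟩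
  | succ k ih =>
      obtain ⟨ih1, ih2, ih3⟩ := ih
      rw [List.range_succ, List.foldl_append, List.foldl_cons, List.foldl_nil]
      set st := (List.range k).foldl (gB r t) ([(t.length : Int)], 0) with hst
      have hpre : ∀ j, j < st.2 →
          PySem.Chars.isIn (PySem.List.slice t (some (j : Int)) (some ((k : Int) + 1))) r = false := by
        intro j hj
        cases hcx : PySem.Chars.isIn (PySem.List.slice t (some (j : Int)) (some ((k : Int) + 1))) r with
        | false => rfl
        | true =>
            exfalso
            have hinf := (PySem.Chars.isIn_iff_infix _ _).mp hcx
            have : PySem.Chars.isIn (PySem.List.slice t (some (j : Int)) (some (k : Int))) r = true :=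
              (PySem.Chars.isIn_iff_infix _ _).mpr ((slice_end_mono t j k).isInfix.trans hinf)
            rw [ih3 j hj] at this
            exact Bool.noConfusion this
      obtain ⟨ha, hb, hc, hd⟩ := advance_spec r t k st.2 (by omega)
      have hlow : ∀ j, j < advance r t k st.2 →
          PySem.Chars.isIn (PySem.List.slice t (some (j : Int)) (some ((k : Int) + 1))) r = false := by
        intro j hj
        by_cases hjs : j < st.2
        · exact hpre j hjs
        · exact hc j (by omega) hj
      refine ⟨?_, by simpa [gB] using ha, ?_⟩
      · show st.1 ++ [innerB st.1 k (advance r t k st.2)] = specC r t (k + 1)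
        have hC : specC r t (k + 1) = specC r t k ++
            [(List.range (k + 1)).foldl (stepS r t (specC r t k) k) 1] := by
          unfold specC
          conv_lhs => rw [List.range_succ]
          rw [List.foldl_append, List.foldl_cons, List.foldl_nil]
        rw [hC, ← ih1]
        congr 1
        rw [innerB_eq_fold r t st.1 k (advance r t k st.2) ha hlow hd]
      · intro j hj
        have hj' : j < advance r t k st.2 := by simpa [gB] using hj
        have h1 : ((k + 1 : Nat) : Int) = (k : Int) + 1 := by push_cast; ring
        rw [h1]
        exact hlow j hj'

-- ===== VERDICT (by name: the statement is the Claim_ definition above) =====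
theorem solution_spec : Claim_equal_solution := by
  intro reference track _
  unfold Spec_solution solution solution_alt
  dsimp only
  set r := reference.toList
  set t := track.toList
  congr 1
  have hA : (PySem.List.pyRange 0 (PySem.List.len t) 1).foldl
      (fun answer i => answer ++ [innerA (combA r) t answer i]) [PySem.List.len t]
      = specC r t t.length := by
    rw [PySem.List.len_eq, PySem.List.pyRange_zero_natCast, List.foldl_map]
    unfold specC
    apply PySem.List.foldl_congr_mem
    intro ans i hi
    have him : i < t.length := List.mem_range.mp hi
    rw [innerA_eq_fold r t ans i him]
  have hB : ((List.range t.length).foldl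
      (fun st i =>
        let jmin := advance r t i st.2
        (st.1 ++ [innerB st.1 i jmin], jmin))
      ([(t.length : Int)], 0)).1 = specC r t t.length := by
    have := (B_state r t t.length).1
    simpa [gB] using this
  rw [hA, ← hB]
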